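-- pv_equiv track=rewrite | github.com/NerosoDope/gosu-translator | core.gosu.vn-main/backend/app/modules/translate/router.py | _build_token_batches
-- ===== SOURCE A (Python) =====
-- from typing import Any, Dict, List, Optional, Tuple
--
-- TRANSLATE_BATCH_SIZE = 30
--
-- TRANSLATE_BATCH_MAX_INPUT_TOKENS = 1500
--
-- def _estimate_tokens(text: str) -> int:
--     """Ước tính số token: tiếng Việt/Anh ≈ 3 ký tự/token (không cần tiktoken)."""
--     return max(1, len(text) // 3)
--
-- def _build_token_batches(
--     pending: "List[Tuple[int, str, str]]",
--     max_tokens: int = TRANSLATE_BATCH_MAX_INPUT_TOKENS,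
--     max_items: int = TRANSLATE_BATCH_SIZE,
-- ) -> "List[List[Tuple[int, str, str]]]":
--     """
--     Gom pending cells thành batches dựa trên ước tính token.
--     Mỗi item chiếm: _estimate_tokens(text) + 6 (overhead số dòng + dấu chấm).
--     """
--     batches: List[List[Tuple[int, str, str]]] = []
--     current: List[Tuple[int, str, str]] = []
--     current_tokens = 0
--     for item in pending:
--         tok = _estimate_tokens(item[2]) + 6
--         if current and (current_tokens + tok > max_tokens or len(current) >= max_items):
--             batches.append(current)
--             current = [item]
--             current_tokens = tok
--         else:
--             current.append(item)
--             current_tokens += tok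
--     if current:
--         batches.append(current)
--     return batches
-- ===== SOURCE B (Python) =====
-- TRANSLATE_BATCH_SIZE = 30
-- TRANSLATE_BATCH_MAX_INPUT_TOKENS = 1500
--
-- def _estimate_tokens(text: str) -> int:
--     return max(1, len(text) // 3)
--
-- def _take_count(costs, max_tokens, max_items):
--     # first element is always taken; extend while both caps allow
--     total = costs[0]
--     k = 1
--     while k < len(costs) and k < max_items and total + costs[k] <= max_tokens:
--         total += costs[k]
--         k += 1
--     return k
--
-- def _build_token_batches(
--     pending,
--     max_tokens: int = TRANSLATE_BATCH_MAX_INPUT_TOKENS,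
--     max_items: int = TRANSLATE_BATCH_SIZE,
-- ):
--     # staged passes: (1) project items to integer costs, (2) compute batch
--     # sizes on the cost list alone, (3) slice pending by those sizes
--     costs = [_estimate_tokens(text) + 6 for _, _, text in pending]
--     sizes = []
--     rest = costs
--     while rest:
--         k = _take_count(rest, max_tokens, max_items)
--         sizes.append(k)
--         rest = rest[k:]
--     batches = []
--     pos = 0
--     for k in sizes:
--         batches.append(pending[pos:pos + k])
--         pos += k
--     return batches
-- ===== Notes on version B (the rewrite author's own statement) =====
-- stated objective: alternative
-- what changed: Replaces A's single fold that threads batches/current/current_tokens through the item list by three staged passes: project items to an integer cost list, compute only the batch sizes on that cost list, then reconstruct the batches by slicing pending at those sizes.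
import Mathlib
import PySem

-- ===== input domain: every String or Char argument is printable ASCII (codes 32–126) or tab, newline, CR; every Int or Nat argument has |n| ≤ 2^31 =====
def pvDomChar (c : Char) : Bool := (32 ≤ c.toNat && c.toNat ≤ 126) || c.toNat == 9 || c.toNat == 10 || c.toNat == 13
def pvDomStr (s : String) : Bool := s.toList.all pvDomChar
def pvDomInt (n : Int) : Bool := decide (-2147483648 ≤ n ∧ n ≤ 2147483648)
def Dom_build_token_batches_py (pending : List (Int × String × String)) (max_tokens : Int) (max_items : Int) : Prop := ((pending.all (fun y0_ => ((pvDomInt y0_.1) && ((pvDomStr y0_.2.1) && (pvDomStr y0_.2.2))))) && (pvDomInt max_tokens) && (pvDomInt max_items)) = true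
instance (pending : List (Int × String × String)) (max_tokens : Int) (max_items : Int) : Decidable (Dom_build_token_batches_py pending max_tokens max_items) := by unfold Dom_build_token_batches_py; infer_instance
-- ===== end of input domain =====

-- B replaces A's single fold over the items by three staged passes (cost projection,
-- batch sizes on the cost list, slicing reconstruction); same values, objective: alternative.

-- ===== PORT A =====
-- _estimate_tokens(text) = max(1, len(text) // 3)
def pvEst (text : String) : Int := max 1 (PySem.Int.floordiv (PySem.Str.len text) 3)

-- one step of A's for-loop over (batches, current, current_tokens)
def pvStepA (max_tokens max_items : Int)
    (st : List (List (Int × String × String)) × List (Int × String × String) × Int)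
    (item : Int × String × String) :
    List (List (Int × String × String)) × List (Int × String × String) × Int :=
  let tok := pvEst item.2.2 + 6
  if st.2.1 ≠ [] ∧ (st.2.2 + tok > max_tokens ∨ max_items ≤ (st.2.1.length : Int)) then
    (st.1 ++ [st.2.1], [item], tok)
  else
    (st.1, st.2.1 ++ [item], st.2.2 + tok)

def build_token_batches_py (pending : List (Int × String × String)) (max_tokens : Int) (max_items : Int) : List (List (Int × String × String)) :=
  let st := pending.foldl (pvStepA max_tokens max_items) ([], [], 0)
  if st.2.1 ≠ [] then st.1 ++ [st.2.1] else st.1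

-- ===== PORT B =====
-- _take_count: the while loop over costs[k] is the obvious recursion over the tail,
-- carrying (total, k); the first cost is already consumed by the caller
def pvTakeCount (max_tokens max_items : Int) (total : Int) (k : Nat) : List Int → Nat
  | [] => k
  | c :: cs =>
    if (k : Int) < max_items ∧ total + c ≤ max_tokens then
      pvTakeCount max_tokens max_items (total + c) (k + 1) cs
    else k

-- needed by pvSizes's termination: _take_count returns at least its start index
theorem pvTakeCount_ge (max_tokens max_items : Int) :
    ∀ (cs : List Int) (total : Int) (k : Nat), k ≤ pvTakeCount max_tokens max_items total k cs := by
  intro cs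
  induction cs with
  | nil => intro total k; simp [pvTakeCount]
  | cons c cs ih =>
    intro total k
    simp only [pvTakeCount]
    split
    · exact le_trans (Nat.le_succ k) (ih _ _)
    · exact le_refl k

-- the sizes loop: while rest: k = _take_count(rest,…); sizes.append(k); rest = rest[k:]
def pvSizes (max_tokens max_items : Int) : List Int → List Nat
  | [] => []
  | c :: cs =>
    let k := pvTakeCount max_tokens max_items c 1 cs
    k :: pvSizes max_tokens max_items ((c :: cs).drop k)
termination_by l => l.length
decreasing_by
  simp only [List.length_drop, List.length_cons]
  have h1 : 1 ≤ pvTakeCount max_tokens max_items c 1 cs := pvTakeCount_ge _ _ cs c 1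
  omega

-- the reconstruction loop: batches.append(pending[pos:pos+k]); pos += k
def pvChunk {α : Type} : List Nat → List α → List (List α)
  | [], _ => []
  | k :: ks, xs => xs.take k :: pvChunk ks (xs.drop k)

def build_token_batches_py_alt (pending : List (Int × String × String)) (max_tokens : Int) (max_items : Int) : List (List (Int × String × String)) :=
  let costs := pending.map (fun it => pvEst it.2.2 + 6)
  pvChunk (pvSizes max_tokens max_items costs) pending

-- ===== PRECONDITION & SPEC =====
def Spec_build_token_batches_py (pending : List (Int × String × String)) (max_tokens : Int) (max_items : Int) (out : List (List (Int × String × String))) : Prop := out = build_token_batches_py_alt pending max_tokens max_items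
instance (pending : List (Int × String × String)) (max_tokens : Int) (max_items : Int) (out : List (List (Int × String × String))) : Decidable (Spec_build_token_batches_py pending max_tokens max_items out) := by unfold Spec_build_token_batches_py; infer_instance

-- ===== CLAIM (what is proved, stated in full; the proofs are below) =====
def Claim_equal_build_token_batches_py : Prop := ∀ (pending : List (Int × String × String)) (max_tokens : Int) (max_items : Int), Dom_build_token_batches_py pending max_tokens max_items → Spec_build_token_batches_py pending max_tokens max_items (build_token_batches_py pending max_tokens max_items)

-- ===== LEMMAS AND PROOFS =====

-- proof-side intermediate: the fill/build view of the greedy grouping, used to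
-- connect A's fold to B's staged passes
def pvFill (max_tokens max_items : Int)
    (current : List (Int × String × String)) (current_tokens : Int) :
    List (Int × String × String) →
    List (Int × String × String) × List (Int × String × String)
  | [] => (current, [])
  | x :: xs =>
    if (current.length : Int) < max_items then
      let tok := pvEst x.2.2 + 6
      if current_tokens + tok > max_tokens then (current, x :: xs)
      else pvFill max_tokens max_items (current ++ [x]) (current_tokens + tok) xs
    else (current, x :: xs)

theorem pvFill_rest_le (max_tokens max_items : Int)
    (current : List (Int × String × String)) (current_tokens : Int)
    (rest : List (Int × String × String)) :
    (pvFill max_tokens max_items current current_tokens rest).2.length ≤ rest.length := by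
  induction rest generalizing current current_tokens with
  | nil => simp [pvFill]
  | cons x xs ih =>
    simp only [pvFill]
    split
    · split
      · simp
      · exact le_trans (ih _ _) (by simp)
    · simp

def pvBuild (max_tokens max_items : Int) :
    List (Int × String × String) → List (List (Int × String × String))
  | [] => []
  | x :: xs =>
    let r := pvFill max_tokens max_items [x] (pvEst x.2.2 + 6) xs
    r.1 :: pvBuild max_tokens max_items r.2
termination_by l => l.length
decreasing_by
  exact Nat.lt_succ_of_le (pvFill_rest_le _ _ _ _ _)

-- pvFill computed through the cost list: it takes exactly the items counted by pvTakeCount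
theorem pv_fill_take (max_tokens max_items : Int) :
    ∀ (rest current : List (Int × String × String)) (ct : Int),
    pvFill max_tokens max_items current ct rest
      = (current ++ rest.take (pvTakeCount max_tokens max_items ct current.length (rest.map (fun it => pvEst it.2.2 + 6)) - current.length),
         rest.drop (pvTakeCount max_tokens max_items ct current.length (rest.map (fun it => pvEst it.2.2 + 6)) - current.length)) := by
  intro rest
  induction rest with
  | nil => intro current ct; simp [pvFill, pvTakeCount]
  | cons x xs ih =>
    intro current ct
    by_cases hk : (current.length : Int) < max_items
    · by_cases htok : ct + (pvEst x.2.2 + 6) ≤ max_tokens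
      · have hnot : ¬ ct + (pvEst x.2.2 + 6) > max_tokens := not_lt.mpr htok
        have hstep : pvFill max_tokens max_items current ct (x :: xs)
            = pvFill max_tokens max_items (current ++ [x]) (ct + (pvEst x.2.2 + 6)) xs := by
          simp [pvFill, hk, hnot]
        rw [hstep, ih]
        simp only [List.map_cons, pvTakeCount,
          if_pos (⟨hk, htok⟩ : (current.length : Int) < max_items ∧ ct + (pvEst x.2.2 + 6) ≤ max_tokens),
          List.length_append, List.length_cons, List.length_nil, Nat.zero_add]
        set j := pvTakeCount max_tokens max_items (ct + (pvEst x.2.2 + 6)) (current.length + 1) (xs.map (fun it => pvEst it.2.2 + 6)) with hj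
        have hge : current.length + 1 ≤ j := pvTakeCount_ge _ _ _ _ _
        have h1 : j - current.length = (j - (current.length + 1)) + 1 := by omega
        rw [h1]
        simp [List.take_succ_cons, List.drop_succ_cons, List.append_assoc]
      · have hgt : max_tokens < ct + (pvEst x.2.2 + 6) := not_le.mp htok
        simp [pvFill, pvTakeCount, hk, hgt, htok]
    · simp [pvFill, pvTakeCount, hk]

-- B's staged passes compute the fill/build view
theorem pv_chunk_build (max_tokens max_items : Int) :
    ∀ (xs : List (Int × String × String)),
    pvChunk (pvSizes max_tokens max_items (xs.map (fun it => pvEst it.2.2 + 6))) xs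
      = pvBuild max_tokens max_items xs := by
  intro xs
  induction hl : xs.length using Nat.strong_induction_on generalizing xs with
  | _ n ih =>
    cases xs with
    | nil => simp [pvSizes, pvChunk, pvBuild]
    | cons x tl =>
      simp only [List.map_cons, pvSizes, pvChunk, pvBuild]
      have hfill := pv_fill_take max_tokens max_items tl [x] (pvEst x.2.2 + 6)
      simp only [List.length_cons, List.length_nil, List.singleton_append, Nat.zero_add] at hfill
      rw [hfill]
      dsimp only
      set k := pvTakeCount max_tokens max_items (pvEst x.2.2 + 6) 1 (tl.map (fun it => pvEst it.2.2 + 6)) with hkdef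
      have hk1 : 1 ≤ k := pvTakeCount_ge _ _ _ _ _
      obtain ⟨m, hm⟩ : ∃ m, k = m + 1 := ⟨k - 1, by omega⟩
      congr 1
      · rw [hm]; simp
      · rw [hm]
        simp only [List.drop_succ_cons, Nat.add_sub_cancel]
        have hdropmap : List.drop m (tl.map (fun it => pvEst it.2.2 + 6))
            = (tl.drop m).map (fun it => pvEst it.2.2 + 6) := by
          simp [List.map_drop]
        rw [hdropmap]
        exact ih (tl.drop m).length (by rw [← hl]; simp) _ rfl

-- invariant connecting A's fold (with a nonempty current batch) to the fill/build view
theorem pv_main (max_tokens max_items : Int)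
    (rest : List (Int × String × String))
    (batches : List (List (Int × String × String)))
    (current : List (Int × String × String)) (ct : Int)
    (hne : current ≠ []) :
    (let st := rest.foldl (pvStepA max_tokens max_items) (batches, current, ct)
     if st.2.1 ≠ [] then st.1 ++ [st.2.1] else st.1)
    = batches ++
      ((pvFill max_tokens max_items current ct rest).1 ::
        pvBuild max_tokens max_items (pvFill max_tokens max_items current ct rest).2) := by
  induction rest generalizing batches current ct with
  | nil =>
    simp [pvFill, pvBuild, hne]
  | cons x xs ih =>
    simp only [List.foldl_cons]
    by_cases h : ct + (pvEst x.2.2 + 6) > max_tokens ∨ max_items ≤ (current.length : Int)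
    · have hstep : pvStepA max_tokens max_items (batches, current, ct) x
          = (batches ++ [current], [x], pvEst x.2.2 + 6) := by
        simp [pvStepA, hne, h]
      rw [hstep, ih _ _ _ (by simp)]
      have hfill : pvFill max_tokens max_items current ct (x :: xs) = (current, x :: xs) := by
        rcases h with h | h
        · by_cases hlen : (current.length : Int) < max_items
          · simp [pvFill, hlen, h]
          · simp [pvFill, hlen]
        · simp [pvFill, not_lt.mpr h]
      rw [hfill]
      simp [pvBuild]
    · push Not at h
      obtain ⟨h1, h2⟩ := h
      have hstep : pvStepA max_tokens max_items (batches, current, ct) x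
          = (batches, current ++ [x], ct + (pvEst x.2.2 + 6)) := by
        simp [pvStepA, not_lt.mpr h1, not_le.mpr h2]
      rw [hstep, ih _ _ _ (by simp)]
      have hfill : pvFill max_tokens max_items current ct (x :: xs)
          = pvFill max_tokens max_items (current ++ [x]) (ct + (pvEst x.2.2 + 6)) xs := by
        simp [pvFill, h2, not_lt.mpr h1]
      rw [hfill]

-- ===== VERDICT (by name: the statement is the Claim_ definition above) =====
theorem build_token_batches_py_spec : Claim_equal_build_token_batches_py := by
  intro pending max_tokens max_items _
  unfold Spec_build_token_batches_py build_token_batches_py build_token_batches_py_alt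
  rw [pv_chunk_build]
  cases pending with
  | nil => simp [pvBuild]
  | cons x xs =>
    simp only [List.foldl_cons]
    have hstep : pvStepA max_tokens max_items ([], [], 0) x
        = ([], [x], pvEst x.2.2 + 6) := by
      simp [pvStepA]
    rw [hstep]
    have := pv_main max_tokens max_items xs [] [x] (pvEst x.2.2 + 6) (by simp)
    simp only at this
    rw [this]
    simp [pvBuild]
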